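-- pv_equiv track=rewrite | github.com/mitsuo0114/competitive_programming | python/atcoder/Grand030/B.py | solve
-- ===== SOURCE A (Python) =====
-- class obj():
--     def __init__(self, x):
--         self.x = x
--         self.previous = None
--         self.next = None
--
--     def __str__(self):
--         return "%d (previous : %d, next : %d" % (self.x, self.previous.x, self.next.x)
--
-- def solve(L, N, Xs):
--     linkedlist = [obj(0)]
--     for x in Xs:
--         o = obj(x)
--         if len(linkedlist):
--             o.previous = linkedlist[-1]
--             linkedlist[-1].next = o
--         linkedlist.append(o)
--     linkedlist[0].previous = linkedlist[-1]
--     linkedlist[-1].next = linkedlist[0]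
--
--     def dfs(i, taken, is_previous):
--         if len(taken) == N + 1:
--             return 0
--         if is_previous:
--             pp = i.previous
--             p_d = i.x - pp.x if pp.x < i.x else L - pp.x + i.x
--             tmp = pp.next
--             pp.next = i.next
--             p = dfs(pp, taken + [pp.x], not(is_previous)) + p_d
--             pp.next = tmp
--             return p
--         else:
--             nn = i.next
--             n_d = nn.x - i.x if nn.x > i.x else L - i.x + nn.x
--             tmp = nn.previous
--             nn.previous = i.previous
--             n = dfs(nn, taken + [nn.x], not(is_previous)) + n_d
--             nn.previous = tmp
--             return n
--
--     return max(dfs(linkedlist[0], [0], True), dfs(linkedlist[0], [0], False))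
-- ===== SOURCE B (Python) =====
-- def solve(L, N, Xs):
--     xs = [0] + list(Xs)
--     n = len(Xs)
--     prev0 = [n] + list(range(n))
--     next0 = list(range(1, n + 1)) + [0]
--     best = None
--     for start_prev in (True, False):
--         prev = prev0[:]
--         nxt = next0[:]
--         i = 0
--         total = 0
--         going_prev = start_prev
--         for _ in range(N):
--             if going_prev:
--                 pp = prev[i]
--                 total += xs[i] - xs[pp] if xs[pp] < xs[i] else L - xs[pp] + xs[i]
--                 nxt[pp] = nxt[i]
--                 i = pp
--             else:
--                 nn = nxt[i]
--                 total += xs[nn] - xs[i] if xs[nn] > xs[i] else L - xs[i] + xs[nn]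
--                 prev[nn] = prev[i]
--                 i = nn
--             going_prev = not going_prev
--         best = total if best is None else max(best, total)
--     return best
-- ===== Notes on version B (the rewrite author's own statement) =====
-- stated objective: faster
-- what changed: Replaces the mutable object linked list and restoring DFS (which copies the growing `taken` list at every step) with two integer pointer arrays and an iterative accumulator loop per starting direction, using a fresh array copy per pass so no restoration is needed.
import Mathlib
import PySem

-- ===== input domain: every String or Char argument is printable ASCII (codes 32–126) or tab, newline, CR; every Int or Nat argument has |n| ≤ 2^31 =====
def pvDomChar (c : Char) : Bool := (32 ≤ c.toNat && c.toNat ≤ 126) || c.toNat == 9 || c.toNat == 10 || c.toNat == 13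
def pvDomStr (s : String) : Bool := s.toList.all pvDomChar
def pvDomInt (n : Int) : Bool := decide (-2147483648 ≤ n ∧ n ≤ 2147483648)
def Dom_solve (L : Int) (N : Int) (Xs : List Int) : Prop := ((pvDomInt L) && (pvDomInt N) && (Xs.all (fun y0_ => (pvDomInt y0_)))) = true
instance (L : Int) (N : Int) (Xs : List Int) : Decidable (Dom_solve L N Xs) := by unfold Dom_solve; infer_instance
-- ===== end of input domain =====

-- B replaces A's mutable object graph + restoring DFS with two integer pointer arrays and
-- an accumulator while-loop per starting direction (alternative decomposition, same O(N) steps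
-- without the O(N^2) `taken` list copies).


-- ===== PORT A =====
-- A's object graph is represented by index arrays: node k's `previous`/`next` pointers are
-- prevA[k]/nextA[k] (indices into the value list xs = 0 :: Xs); this encoding is exact.
-- The build loop `for x in Xs` appends a node linked to the current last node (the
-- `if len(linkedlist)` guard is always true since the list starts with obj(0)).
def solveBuildStep (st : List Nat × List Nat × Nat) (_x : Int) : List Nat × List Nat × Nat :=
  match st with
  | (prevA, nextA, last) =>
    (prevA ++ [last], (nextA.set last prevA.length) ++ [0], prevA.length)

def solveBuild (Xs : List Int) : List Nat × List Nat :=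
  match Xs.foldl solveBuildStep ([0], [0], 0) with   -- node 0 starts with placeholder (None) pointers
  | (prevA, nextA, last) => (prevA.set 0 last, nextA.set last 0)   -- close the circle

-- A's dfs: `taken` carried literally; pointer mutation pp.next = i.next is a functional
-- update passed to the recursive call (the Python restore after the call is the identity
-- here since the caller keeps its own arrays). `fuel` only makes the recursion total;
-- inside Pre_ it never runs out (fuel = N+1 - len(taken) at every call).
def solveDfs (L : Int) (N : Int) (xs : List Int) (fuel : Nat)
    (prevA nextA : List Nat) (i : Nat) (taken : List Int) (isPrev : Bool) : Int :=
  if ((taken.length : Int) == N + 1) then 0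
  else match fuel with
  | 0 => 0
  | f + 1 =>
    if isPrev then
      let pp := prevA.getD i 0
      let p_d := if xs.getD pp 0 < xs.getD i 0 then xs.getD i 0 - xs.getD pp 0
                 else L - xs.getD pp 0 + xs.getD i 0
      let nextA' := nextA.set pp (nextA.getD i 0)
      solveDfs L N xs f prevA nextA' pp (taken ++ [xs.getD pp 0]) (!isPrev) + p_d
    else
      let nn := nextA.getD i 0
      let n_d := if xs.getD nn 0 > xs.getD i 0 then xs.getD nn 0 - xs.getD i 0
                 else L - xs.getD i 0 + xs.getD nn 0
      let prevA' := prevA.set nn (prevA.getD i 0)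
      solveDfs L N xs f prevA' nextA nn (taken ++ [xs.getD nn 0]) (!isPrev) + n_d

def solve (L : Int) (N : Int) (Xs : List Int) : Int :=
  let xs := 0 :: Xs
  let (prevA, nextA) := solveBuild Xs
  max (solveDfs L N xs N.toNat prevA nextA 0 [0] true)
      (solveDfs L N xs N.toNat prevA nextA 0 [0] false)

-- ===== PORT B =====
-- Source B's inner `for _ in range(N)` with accumulator `total`; in-place list writes become
-- List.set on this pass's own copy of the arrays.
def altLoop (L : Int) (xs : List Int) (steps : Nat) (prevA nextA : List Nat)
    (i : Nat) (total : Int) (goingPrev : Bool) : Int :=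
  match steps with
  | 0 => total
  | s + 1 =>
    if goingPrev then
      let pp := prevA.getD i 0
      let d := if xs.getD pp 0 < xs.getD i 0 then xs.getD i 0 - xs.getD pp 0
               else L - xs.getD pp 0 + xs.getD i 0
      altLoop L xs s prevA (nextA.set pp (nextA.getD i 0)) pp (total + d) (!goingPrev)
    else
      let nn := nextA.getD i 0
      let d := if xs.getD nn 0 > xs.getD i 0 then xs.getD nn 0 - xs.getD i 0
               else L - xs.getD i 0 + xs.getD nn 0
      altLoop L xs s (prevA.set nn (prevA.getD i 0)) nextA nn (total + d) (!goingPrev)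

def solve_alt (L : Int) (N : Int) (Xs : List Int) : Int :=
  let xs := 0 :: Xs
  let n := Xs.length
  let prev0 : List Nat := n :: List.range n
  let next0 : List Nat := List.range' 1 n ++ [0]
  max (altLoop L xs N.toNat prev0 next0 0 0 true)
      (altLoop L xs N.toNat prev0 next0 0 0 false)

-- ===== PRECONDITION & SPEC =====
-- A recurses once per step until len(taken) = N+1; for N < 0 that bound is never reached and
-- Python dies with RecursionError, so Pre_ excludes N < 0 (A returns normally for every N ≥ 0).
def Pre_solve (L : Int) (N : Int) (Xs : List Int) : Prop := 0 ≤ N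
instance (L : Int) (N : Int) (Xs : List Int) : Decidable (Pre_solve L N Xs) := by
  unfold Pre_solve; infer_instance

def pvWitness_solve : Int × Int × List Int := (10, 3, [2, 5, 7])

def Spec_solve (L : Int) (N : Int) (Xs : List Int) (out : Int) : Prop := out = solve_alt L N Xs
instance (L : Int) (N : Int) (Xs : List Int) (out : Int) : Decidable (Spec_solve L N Xs out) := by
  unfold Spec_solve; infer_instance

-- ===== CLAIM (what is proved, stated in full; the proofs are below) =====
def Claim_equal_solve : Prop := ∀ (L : Int) (N : Int) (Xs : List Int), Dom_solve L N Xs → Pre_solve L N Xs → Spec_solve L N Xs (solve L N Xs)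

-- ===== LEMMAS AND PROOFS =====

-- A's build loop produces exactly B's pointer arrays.
lemma solveBuild_fold (Xs : List Int) (j : Nat) :
    Xs.foldl solveBuildStep (0 :: List.range j, List.range' 1 j ++ [0], j)
    = (0 :: List.range (j + Xs.length), List.range' 1 (j + Xs.length) ++ [0], j + Xs.length) := by
  induction Xs generalizing j with
  | nil => simp
  | cons x xs ih =>
    simp only [List.foldl_cons, solveBuildStep]
    have h1 : (0 :: List.range j) ++ [j] = 0 :: List.range (j + 1) := by
      simp [List.range_succ]
    have h2 : ((List.range' 1 j ++ [0]).set j ((0 :: List.range j).length)) ++ [0]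
        = List.range' 1 (j + 1) ++ [0] := by
      rw [List.set_append_right _ _ (by simp)]
      simp [List.range'_1_concat]
      omega
    simp only [h1, h2]
    have hlp : (0 :: List.range j).length = j + 1 := by simp
    rw [hlp, ih (j + 1)]
    have hjj : j + 1 + xs.length = j + (x :: xs).length := by simp; omega
    rw [hjj]

lemma solveBuild_eq (Xs : List Int) :
    solveBuild Xs = (Xs.length :: List.range Xs.length, List.range' 1 Xs.length ++ [0]) := by
  unfold solveBuild
  have h0 : (([0] : List Nat), ([0] : List Nat), 0)
      = (0 :: List.range 0, List.range' 1 0 ++ [0], 0) := by simp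
  rw [h0, solveBuild_fold Xs 0]
  simp only [Nat.zero_add, Prod.mk.injEq]
  refine ⟨?_, ?_⟩
  · cases Xs.length with
    | zero => simp
    | succ m => simp [List.range_succ_eq_map]
  · rcases Nat.eq_zero_or_pos Xs.length with h | h
    · simp [h]
    · rw [List.set_append_right _ _ (by simp)]
      simp

-- accumulate-then-return: B's accumulator loop splits off its accumulator.
lemma altLoop_acc (L : Int) (xs : List Int) (steps : Nat) :
    ∀ (prevA nextA : List Nat) (i : Nat) (t : Int) (g : Bool),
    altLoop L xs steps prevA nextA i t g = t + altLoop L xs steps prevA nextA i 0 g := by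
  induction steps with
  | zero => intro prevA nextA i t g; simp [altLoop]
  | succ s ih =>
    intro prevA nextA i t g
    simp only [altLoop]
    split
    · rw [ih, ih _ _ _ (0 + _)]; ring
    · rw [ih, ih _ _ _ (0 + _)]; ring

-- A's dfs equals B's loop when fuel matches the remaining step count.
lemma dfs_eq_loop (L : Int) (N : Int) (xs : List Int) (fuel : Nat) :
    ∀ (prevA nextA : List Nat) (i : Nat) (taken : List Int) (g : Bool),
    (taken.length : Int) + (fuel : Int) = N + 1 →
    solveDfs L N xs fuel prevA nextA i taken g = altLoop L xs fuel prevA nextA i 0 g := by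
  induction fuel with
  | zero =>
    intro prevA nextA i taken g h
    simp only [solveDfs, altLoop]
    have : (taken.length : Int) == N + 1 := by
      simp only [beq_iff_eq]; omega
    simp [this]
  | succ f ih =>
    intro prevA nextA i taken g h
    have hne : ((taken.length : Int) == N + 1) = false := by
      simp only [beq_eq_false_iff_ne, ne_eq]
      push_cast at h ⊢; omega
    simp only [solveDfs, altLoop, hne, Bool.false_eq_true, if_false]
    have hlen : ∀ (v : Int), ((taken ++ [v]).length : Int) + (f : Int) = N + 1 := by
      intro v; simp; push_cast at h ⊢; omega
    split
    · rw [ih _ _ _ _ _ (hlen _)]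
      conv_rhs => rw [altLoop_acc]
      ring
    · rw [ih _ _ _ _ _ (hlen _)]
      conv_rhs => rw [altLoop_acc]
      ring

-- ===== VERDICT (by name: the statement is the Claim_ definition above) =====
theorem solve_spec : Claim_equal_solve := by
  intro L N Xs _ hPre
  unfold Pre_solve at hPre
  unfold Spec_solve
  simp only [solve, solve_alt, solveBuild_eq]
  have hfuel : ((([(0:Int)]).length : Int)) + ((N.toNat : Nat) : Int) = N + 1 := by
    simp only [List.length_cons, List.length_nil]; omega
  rw [dfs_eq_loop L N (0 :: Xs) N.toNat _ _ 0 [0] true hfuel,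
      dfs_eq_loop L N (0 :: Xs) N.toNat _ _ 0 [0] false hfuel]
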